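-- pv_equiv track=rewrite | github.com/stubear66/600X | FingerExercises/jumpAndBackPedal.py | generateForm
-- ===== SOURCE A (Python) =====
-- def generateForm(story, listOfAdjs, listOfNouns, listOfVerbs):
--     """
--     story: a string containing sentences
--     listOfAdjs: a list of valid adjectives
--     listOfNouns: a list of valid nouns
--     listOfVerbs: a list of valid verbs
--
--     For each word in story that is in one of the lists,
--     * replace it with the string '[ADJ]' if the word is in listOfAdjs
--     * replace it with the string '[VERB]' if the word is in listOfVerbs
--     * replace it with the string '[NOUN]' if the word is in listOfNouns
--
--     returns: string, A Mad-Libs form of the story.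
--     """
--     # Your Code Here
--     words = story.split(' ')
--     form = ''
--     for word in words:
--         if word in listOfAdjs:
--             form += '[ADJ] '
--         elif word in listOfVerbs:
--             form += '[VERB] '
--         elif word in listOfNouns:
--             form += '[NOUN] '
--         else:
--             form += word + ' '
--
--     return form
-- ===== SOURCE B (Python) =====
-- def generateForm(story, listOfAdjs, listOfNouns, listOfVerbs):
--     # staged whole-list passes: tag tokens category by category, then render once
--     tokens = [(w, None) for w in story.split(' ')]
--     for wordlist, tag in ((listOfAdjs, '[ADJ] '), (listOfVerbs, '[VERB] '), (listOfNouns, '[NOUN] ')):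
--         tokens = [(w, tag) if t is None and w in wordlist else (w, t) for (w, t) in tokens]
--     return ''.join(w + ' ' if t is None else t for (w, t) in tokens)
-- ===== Notes on version B (the rewrite author's own statement) =====
-- stated objective: alternative
-- what changed: B replaces A's per-word if/elif chain by three staged whole-list tagging passes over an Option-tagged token list (adjs, then verbs, then nouns tagging only still-untagged tokens) and renders the result with one final join instead of a string accumulator.
import Mathlib
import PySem

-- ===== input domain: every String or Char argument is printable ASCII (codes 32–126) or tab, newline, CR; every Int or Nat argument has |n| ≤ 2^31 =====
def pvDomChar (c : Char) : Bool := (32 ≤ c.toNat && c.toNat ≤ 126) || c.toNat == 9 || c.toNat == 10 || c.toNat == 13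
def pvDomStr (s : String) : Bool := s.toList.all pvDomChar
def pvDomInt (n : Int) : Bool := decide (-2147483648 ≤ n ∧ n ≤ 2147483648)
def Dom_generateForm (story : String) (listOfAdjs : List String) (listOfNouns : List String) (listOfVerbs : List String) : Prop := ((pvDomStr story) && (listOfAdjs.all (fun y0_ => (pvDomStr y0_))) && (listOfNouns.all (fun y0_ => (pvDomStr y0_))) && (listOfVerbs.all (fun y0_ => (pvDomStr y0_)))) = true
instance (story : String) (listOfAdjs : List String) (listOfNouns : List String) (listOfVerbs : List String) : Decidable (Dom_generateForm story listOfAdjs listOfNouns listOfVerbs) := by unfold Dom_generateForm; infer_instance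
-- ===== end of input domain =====

-- B tags the whole token list in three staged passes (adjs, verbs, nouns) and renders with one final join, instead of A's per-word if/elif chain with a string accumulator (alternative).

-- ===== PORT A =====
def generateForm (story : String) (listOfAdjs : List String) (listOfNouns : List String) (listOfVerbs : List String) : String :=
  let words := (PySem.Str.split? story " ").getD []
  let form := words.foldl (fun form word =>
    if listOfAdjs.contains word then form ++ "[ADJ] "
    else if listOfVerbs.contains word then form ++ "[VERB] "
    else if listOfNouns.contains word then form ++ "[NOUN] "
    else form ++ word ++ " ") ""
  form

-- ===== PORT B =====
-- one staged pass: tag still-untagged tokens found in wordlist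
def gfPass (wordlist : List String) (tag : String) (tokens : List (String × Option String)) : List (String × Option String) :=
  tokens.map (fun p => if p.2 = none ∧ wordlist.contains p.1 then (p.1, some tag) else p)

def generateForm_alt (story : String) (listOfAdjs : List String) (listOfNouns : List String) (listOfVerbs : List String) : String :=
  let tokens := ((PySem.Str.split? story " ").getD []).map (fun w => (w, (none : Option String)))
  let tokens := gfPass listOfAdjs "[ADJ] " tokens
  let tokens := gfPass listOfVerbs "[VERB] " tokens
  let tokens := gfPass listOfNouns "[NOUN] " tokens
  String.join (tokens.map (fun p => match p.2 with | none => p.1 ++ " " | some t => t))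

-- ===== PRECONDITION & SPEC =====
def Spec_generateForm (story : String) (listOfAdjs : List String) (listOfNouns : List String) (listOfVerbs : List String) (out : String) : Prop := out = generateForm_alt story listOfAdjs listOfNouns listOfVerbs
instance (story : String) (listOfAdjs : List String) (listOfNouns : List String) (listOfVerbs : List String) (out : String) : Decidable (Spec_generateForm story listOfAdjs listOfNouns listOfVerbs out) := by unfold Spec_generateForm; infer_instance

-- ===== CLAIM (what is proved, stated in full; the proofs are below) =====
def Claim_equal_generateForm : Prop := ∀ (story : String) (listOfAdjs : List String) (listOfNouns : List String) (listOfVerbs : List String), Dom_generateForm story listOfAdjs listOfNouns listOfVerbs → Spec_generateForm story listOfAdjs listOfNouns listOfVerbs (generateForm story listOfAdjs listOfNouns listOfVerbs)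

-- ===== LEMMAS AND PROOFS =====

-- per-word piece contributed by A (proof helper only)
def gfPiece (listOfAdjs listOfNouns listOfVerbs : List String) (w : String) : String :=
  if listOfAdjs.contains w then "[ADJ] "
  else if listOfVerbs.contains w then "[VERB] "
  else if listOfNouns.contains w then "[NOUN] "
  else w ++ " "

-- gfPass acts elementwise on a mapped list
theorem gfPass_map (wordlist : List String) (tag : String) (ws : List String)
    (f : String → String × Option String) :
    gfPass wordlist tag (ws.map f)
      = ws.map (fun w => if (f w).2 = none ∧ wordlist.contains (f w).1 then ((f w).1, some tag) else f w) := by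
  unfold gfPass; rw [List.map_map]; rfl

theorem foldl_append_hoist (l : List String) (s : String) :
    l.foldl (· ++ ·) s = s ++ l.foldl (· ++ ·) "" := by
  induction l generalizing s with
  | nil => simp
  | cons a l ih =>
    rw [List.foldl_cons, List.foldl_cons, ih (s ++ a), ih ("" ++ a)]
    simp [String.append_assoc]

-- A's if/elif body accumulates exactly the per-word piece
theorem foldlA_eq (listOfAdjs listOfNouns listOfVerbs : List String) (ws : List String) (s : String) :
    ws.foldl (fun form word =>
      if listOfAdjs.contains word then form ++ "[ADJ] "
      else if listOfVerbs.contains word then form ++ "[VERB] "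
      else if listOfNouns.contains word then form ++ "[NOUN] "
      else form ++ word ++ " ") s
    = ws.foldl (fun form w => form ++ gfPiece listOfAdjs listOfNouns listOfVerbs w) s := by
  induction ws generalizing s with
  | nil => rfl
  | cons w ws ih =>
    rw [List.foldl_cons, List.foldl_cons, ih]
    congr 1
    unfold gfPiece
    split_ifs <;> simp [String.append_assoc]

-- the accumulator fold equals the join of the per-word pieces
theorem foldl_append_join (ws : List String) (g : String → String) (s : String) :
    ws.foldl (fun form w => form ++ g w) s = s ++ String.join (ws.map g) := by
  induction ws generalizing s with
  | nil => simp [String.join]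
  | cons w ws ih =>
    rw [List.foldl_cons, ih]
    simp only [List.map_cons, String.join, List.foldl_cons]
    rw [foldl_append_hoist (ws.map g) ("" ++ g w)]
    simp [String.append_assoc]

theorem generateForm_eq_alt (story : String) (listOfAdjs listOfNouns listOfVerbs : List String) :
    generateForm story listOfAdjs listOfNouns listOfVerbs
      = generateForm_alt story listOfAdjs listOfNouns listOfVerbs := by
  simp only [generateForm, generateForm_alt]
  rw [gfPass_map, gfPass_map, gfPass_map, List.map_map]
  rw [foldlA_eq, foldl_append_join]
  simp only [String.empty_append]
  congr 1
  apply List.map_congr_left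
  intro w _
  by_cases ha : w ∈ listOfAdjs <;>
    by_cases hv : w ∈ listOfVerbs <;>
      by_cases hn : w ∈ listOfNouns <;>
        simp [gfPiece, Function.comp, ha, hv, hn]

-- ===== VERDICT (by name: the statement is the Claim_ definition above) =====
theorem generateForm_spec : Claim_equal_generateForm := by
  intro story listOfAdjs listOfNouns listOfVerbs _
  exact generateForm_eq_alt story listOfAdjs listOfNouns listOfVerbs
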